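-- pv_equiv track=rewrite | github.com/DragunWF/Competitive-Programming | CodeWars/python/6_kyu/complete_the_pattern_11.py | generate_middle_line
-- ===== SOURCE A (Python) =====
-- def generate_middle_line(n: int) -> str:
--     output = []
--     for i in range(1, n):
--         output.append(str(i % 10))
--     output.append(str(n % 10) * n)
--     for i in range(n - 1, 0, -1):
--         output.append(str(i % 10))
--     return "".join(output)
-- ===== SOURCE B (Python) =====
-- def generate_middle_line(n: int) -> str:
--     cycle = "1234567890"
--     k = max(n - 1, 0)
--     half = (cycle * (k // 10 + 1))[:k]
--     return half + cycle[(n - 1) % 10] * n + half[::-1]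
-- ===== Notes on version B (the rewrite author's own statement) =====
-- stated objective: alternative
-- what changed: B replaces A's two digit-generating loops (per-element str(i % 10) appends, ascending then descending) by tiling a precomputed 10-character cycle table '1234567890': the left half is a slice of the tiled table, the middle digit is a table lookup, and the right half is the mirrored left half; no per-element modulo/str conversion or append loop remains.
import Mathlib
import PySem

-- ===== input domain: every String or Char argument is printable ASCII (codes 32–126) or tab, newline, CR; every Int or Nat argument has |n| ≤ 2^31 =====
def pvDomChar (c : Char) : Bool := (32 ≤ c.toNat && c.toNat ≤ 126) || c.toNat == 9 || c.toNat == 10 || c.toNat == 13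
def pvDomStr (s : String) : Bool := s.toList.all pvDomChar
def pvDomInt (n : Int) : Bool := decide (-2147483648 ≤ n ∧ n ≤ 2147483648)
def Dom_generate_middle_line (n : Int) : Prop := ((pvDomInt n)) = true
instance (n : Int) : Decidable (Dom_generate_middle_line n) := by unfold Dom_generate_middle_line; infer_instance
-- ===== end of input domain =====

-- B replaces A's two per-digit generating loops by tiling the constant cycle "1234567890":
-- the left half is a slice of the tiled table, the middle digit a table lookup, the right
-- half the mirrored left half (objective: alternative; same return value).

-- ===== PORT A =====
-- A appends str(i % 10) for i in range(1, n), then str(n % 10) * n, then str(i % 10)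
-- for i in range(n - 1, 0, -1), and joins with "".
def generate_middle_line (n : Int) : String :=
  let output : List (List Char) :=
    (PySem.List.pyRange 1 n 1).foldl
      (fun acc i => acc ++ [PySem.Int.toChars (PySem.Int.mod i 10)]) []
  let output := output ++ [PySem.List.pyRepeat (PySem.Int.toChars (PySem.Int.mod n 10)) n]
  let output :=
    (PySem.List.pyRange (n - 1) 0 (-1)).foldl
      (fun acc i => acc ++ [PySem.Int.toChars (PySem.Int.mod i 10)]) output
  String.ofList (PySem.Chars.join [] output)

-- ===== PORT B =====
-- cycle = "1234567890"; k = max(n - 1, 0); half = (cycle * (k // 10 + 1))[:k];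
-- return half + cycle[(n - 1) % 10] * n + half[::-1]  (half[::-1] is List.reverse,
-- PySem.List.slice?_none_none_neg_one; cycle[(n - 1) % 10] always in range 0..9, so
-- the pyGetD default is never used).
def generate_middle_line_alt (n : Int) : String :=
  let cyc : List Char := ['1', '2', '3', '4', '5', '6', '7', '8', '9', '0']
  let k : Int := max (n - 1) 0
  let half : List Char :=
    PySem.List.slice (PySem.List.pyRepeat cyc (PySem.Int.floordiv k 10 + 1)) none (some k)
  String.ofList
    (half ++ PySem.List.pyRepeat [PySem.List.pyGetD cyc (PySem.Int.mod (n - 1) 10) '0'] n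
      ++ half.reverse)

-- ===== PRECONDITION & SPEC =====
def Spec_generate_middle_line (n : Int) (out : String) : Prop := out = generate_middle_line_alt n
instance (n : Int) (out : String) : Decidable (Spec_generate_middle_line n out) := by unfold Spec_generate_middle_line; infer_instance

-- ===== CLAIM (what is proved, stated in full; the proofs are below) =====
def Claim_equal_generate_middle_line : Prop := ∀ (n : Int), Dom_generate_middle_line n → Spec_generate_middle_line n (generate_middle_line n)

-- ===== LEMMAS AND PROOFS =====

-- the digit character of i % 10 (proof-side abbreviation)
def pvDc (i : Int) : Char := Char.ofNat (48 + (PySem.Int.mod i 10).toNat)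

-- the cycle table, proof-side name
def pvCyc : List Char := ['1', '2', '3', '4', '5', '6', '7', '8', '9', '0']

-- "".join on a list of pieces is flatten.
theorem join_nil_sep (parts : List (List Char)) : PySem.Chars.join [] parts = parts.flatten := by
  induction parts with
  | nil => simp [PySem.Chars.join_nil]
  | cons p ps ih =>
    cases ps with
    | nil => simp [PySem.Chars.join_singleton]
    | cons q qs => simp [PySem.Chars.join_cons_cons, ih]

-- str(m) for 0 ≤ m < 10 is the single digit character.
theorem toChars_digit (m : Int) (h0 : 0 ≤ m) (h1 : m < 10) :
    PySem.Int.toChars m = [Char.ofNat (48 + m.toNat)] := by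
  interval_cases m <;> decide

-- str(i % 10) is [pvDc i].
theorem toChars_mod_ten (i : Int) :
    PySem.Int.toChars (PySem.Int.mod i 10) = [pvDc i] :=
  toChars_digit _ (PySem.Int.mod_nonneg i (by norm_num)) (PySem.Int.mod_lt i (by norm_num))

-- flatten of the per-digit pieces is a plain map.
theorem flatten_digits (xs : List Int) :
    ((xs.map (fun i => PySem.Int.toChars (PySem.Int.mod i 10))).flatten) = xs.map pvDc := by
  induction xs with
  | nil => rfl
  | cons x xs ih =>
    rw [List.map_cons, List.flatten_cons, toChars_mod_ten, ih, List.map_cons]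
    rfl

-- pvDc is 10-periodic.
theorem pvDc_add_ten (i : Int) : pvDc (i + 10) = pvDc i := by
  unfold pvDc
  have h1 : PySem.Int.mod (i + 10) 10 = (i + 10) % 10 := PySem.Int.mod_eq_emod_of_pos (by norm_num)
  have h2 : PySem.Int.mod i 10 = i % 10 := PySem.Int.mod_eq_emod_of_pos (by norm_num)
  rw [h1, h2]
  congr 1
  omega

-- the tiled cycle is exactly the ascending digit characters 1,2,…,9,0,1,…
theorem tile (m : Nat) :
    PySem.List.pyRepeat pvCyc ((m : Int))
      = (List.range (10 * m)).map (fun j : Nat => pvDc (1 + (j : Int))) := by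
  induction m with
  | zero => simp [PySem.List.pyRepeat]
  | succ m ih =>
    have hstep : PySem.List.pyRepeat pvCyc (((m + 1 : Nat) : Int))
        = pvCyc ++ PySem.List.pyRepeat pvCyc ((m : Int)) := by
      simp [PySem.List.pyRepeat, List.replicate_succ]
    rw [hstep, ih]
    have h10 : 10 * (m + 1) = 10 + 10 * m := by ring
    have hhead : pvCyc = (List.range 10).map (fun j : Nat => pvDc (1 + (j : Int))) := by decide
    have htail : ((List.range (10 * m)).map (fun x => 10 + x)).map
          (fun j : Nat => pvDc (1 + (j : Int)))
        = (List.range (10 * m)).map (fun j : Nat => pvDc (1 + (j : Int))) := by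
      rw [List.map_map]
      refine List.map_congr_left (fun j _ => ?_)
      simp only [Function.comp_apply]
      have h : (1 : Int) + ((10 + j : Nat) : Int) = (1 + (j : Int)) + 10 := by push_cast; ring
      rw [h, pvDc_add_ten]
    rw [h10, List.range_add, List.map_append, htail, ← hhead]

-- B's left half equals the map of pvDc over range(1, n).
theorem half_eq (n : Int) :
    PySem.List.slice
        (PySem.List.pyRepeat pvCyc (PySem.Int.floordiv (max (n - 1) 0) 10 + 1)) none
        (some (max (n - 1) 0))
      = (PySem.List.pyRange 1 n 1).map pvDc := by
  have hk : max (n - 1) 0 = (((n - 1).toNat : Nat) : Int) := by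
    rw [Int.toNat_eq_max]
  set K : Nat := (n - 1).toNat with hK
  rw [hk]
  have hdiv : PySem.Int.floordiv ((K : Int)) 10 + 1 = (((K / 10 + 1 : Nat)) : Int) := by
    rw [PySem.Int.floordiv_eq_ediv_of_pos (by norm_num)]
    omega
  rw [hdiv, tile (K / 10 + 1), PySem.List.slice_to_natCast]
  rw [← List.map_take, List.take_range, Nat.min_eq_left (by omega)]
  rw [PySem.List.pyRange_one, List.map_map]
  rfl

-- B's middle character equals str(n % 10).
theorem mid_eq (n : Int) :
    [PySem.List.pyGetD pvCyc (PySem.Int.mod (n - 1) 10) '0']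
      = PySem.Int.toChars (PySem.Int.mod n 10) := by
  have h1 : PySem.Int.mod n 10 = n % 10 := PySem.Int.mod_eq_emod_of_pos (by norm_num)
  have h2 : PySem.Int.mod (n - 1) 10 = (n - 1) % 10 := PySem.Int.mod_eq_emod_of_pos (by norm_num)
  rw [h1, h2]
  have hr0 : 0 ≤ (n - 1) % 10 := Int.emod_nonneg _ (by norm_num)
  have hr1 : (n - 1) % 10 < 10 := Int.emod_lt_of_pos _ (by norm_num)
  have hm : n % 10 = if (n - 1) % 10 = 9 then 0 else (n - 1) % 10 + 1 := by omega
  rw [hm]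
  set r : Int := (n - 1) % 10 with hrdef
  clear_value r
  interval_cases r <;> norm_num <;> decide

-- ===== VERDICT (by name: the statement is the Claim_ definition above) =====
theorem generate_middle_line_spec : Claim_equal_generate_middle_line := by
  intro n _
  show generate_middle_line n = generate_middle_line_alt n
  unfold generate_middle_line generate_middle_line_alt
  have hrev : PySem.List.pyRange (n - 1) 0 (-1) = (PySem.List.pyRange 1 n 1).reverse := by
    have := PySem.List.pyRange_neg_one_eq_reverse (n - 1) 0
    simpa using this
  simp only [PySem.List.foldl_append_singleton_eq_map, hrev, join_nil_sep, List.nil_append,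
    List.flatten_append, List.flatten_cons, List.flatten_nil, List.append_nil,
    List.append_assoc]
  rw [flatten_digits, flatten_digits, List.map_reverse]
  rw [show (['1', '2', '3', '4', '5', '6', '7', '8', '9', '0'] : List Char) = pvCyc from rfl,
      half_eq, ← mid_eq]
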